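-- pv_equiv track=rewrite | github.com/lucas-colab/New-folder | 3.py | decimal_para_octal_com_explicacao
-- ===== SOURCE A (Python) =====
-- def decimal_para_octal_com_explicacao(decimal):
--     numero_octal = ""
--     explicacao = ""
--
--     while decimal > 0:
--         resto = decimal % 8
--         numero_octal = str(resto) + numero_octal
--         if explicacao:
--             explicacao = f"{decimal} ÷ 8 = {decimal // 8}, resto {resto} + " + explicacao
--         else:
--             explicacao = f"{decimal} ÷ 8 = {decimal // 8}, resto {resto}"
--         decimal //= 8
--
--     explicacao += f" = {numero_octal}"
--
--     return numero_octal, explicacao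
-- ===== SOURCE B (Python) =====
-- def decimal_para_octal_com_explicacao(decimal):
--     def rec(d):
--         line = f"{d} ÷ 8 = {d // 8}, resto {d % 8}"
--         if d // 8 > 0:
--             sub_octal, sub_expl = rec(d // 8)
--             return sub_octal + str(d % 8), sub_expl + " + " + line
--         return str(d % 8), line
--
--     if decimal > 0:
--         numero_octal, explicacao = rec(decimal)
--     else:
--         numero_octal, explicacao = "", ""
--     return numero_octal, explicacao + f" = {numero_octal}"
-- ===== Notes on version B (the rewrite author's own statement) =====
-- stated objective: alternative
-- what changed: Replaces the flat while-loop with two string accumulators by a recursive base-conversion helper that builds the octal digits and the explanation bottom-up from the recursion on decimal // 8.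
import Mathlib
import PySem

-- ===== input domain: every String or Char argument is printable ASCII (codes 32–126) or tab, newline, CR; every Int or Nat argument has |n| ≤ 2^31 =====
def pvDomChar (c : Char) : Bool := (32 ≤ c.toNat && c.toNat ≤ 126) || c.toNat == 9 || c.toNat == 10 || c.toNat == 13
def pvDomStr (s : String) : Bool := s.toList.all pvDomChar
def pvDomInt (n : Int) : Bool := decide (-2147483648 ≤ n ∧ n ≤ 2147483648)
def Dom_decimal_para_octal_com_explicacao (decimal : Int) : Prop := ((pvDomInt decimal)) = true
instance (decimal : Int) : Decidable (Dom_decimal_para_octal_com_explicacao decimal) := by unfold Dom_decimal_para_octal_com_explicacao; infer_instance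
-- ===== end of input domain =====

-- B replaces A's while-loop with two prepend-accumulators by a recursive base-conversion
-- helper building both strings bottom-up (objective: alternative decomposition, same cost).

-- ===== PORT A =====
-- the while-loop of A; state = (decimal, numero_octal, explicacao)
def pvLoopA (decimal : Int) (numero_octal explicacao : String) : String × String :=
  if h : decimal > 0 then
    let resto := PySem.Int.mod decimal 8
    let numero_octal' := PySem.Int.toStr resto ++ numero_octal
    let explicacao' :=
      if explicacao ≠ "" then
        PySem.Int.toStr decimal ++ " ÷ 8 = " ++ PySem.Int.toStr (PySem.Int.floordiv decimal 8)
          ++ ", resto " ++ PySem.Int.toStr resto ++ " + " ++ explicacao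
      else
        PySem.Int.toStr decimal ++ " ÷ 8 = " ++ PySem.Int.toStr (PySem.Int.floordiv decimal 8)
          ++ ", resto " ++ PySem.Int.toStr resto
    pvLoopA (PySem.Int.floordiv decimal 8) numero_octal' explicacao'
  else
    (numero_octal, explicacao)
termination_by decimal.toNat
decreasing_by
  rw [PySem.Int.floordiv_eq_ediv_of_pos (by norm_num)]
  have h1 := Int.mul_ediv_add_emod decimal 8
  have h2 := Int.emod_nonneg decimal (by norm_num : (8:Int) ≠ 0)
  have h3 := Int.emod_lt_of_pos decimal (by norm_num : (0:Int) < 8)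
  omega

def decimal_para_octal_com_explicacao (decimal : Int) : String × String :=
  let r := pvLoopA decimal "" ""
  (r.1, r.2 ++ " = " ++ r.1)

-- ===== PORT B =====
-- recursive helper rec(d) from Source B (Source B only calls it with d > 0)
def pvRecB (d : Int) : String × String :=
  let line := PySem.Int.toStr d ++ " ÷ 8 = " ++ PySem.Int.toStr (PySem.Int.floordiv d 8)
      ++ ", resto " ++ PySem.Int.toStr (PySem.Int.mod d 8)
  if h : PySem.Int.floordiv d 8 > 0 then
    let sub := pvRecB (PySem.Int.floordiv d 8)
    (sub.1 ++ PySem.Int.toStr (PySem.Int.mod d 8), sub.2 ++ " + " ++ line)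
  else
    (PySem.Int.toStr (PySem.Int.mod d 8), line)
termination_by d.toNat
decreasing_by
  have h8 : (8 : Int) ≤ d := by
    by_contra hc
    have : PySem.Int.floordiv d 8 < 1 := by
      rw [PySem.Int.floordiv_lt_iff_lt_mul (by norm_num)]; omega
    omega
  rw [PySem.Int.floordiv_eq_ediv_of_pos (by norm_num)]
  have h1 := Int.mul_ediv_add_emod d 8
  have h2 := Int.emod_nonneg d (by norm_num : (8:Int) ≠ 0)
  have h3 := Int.emod_lt_of_pos d (by norm_num : (0:Int) < 8)
  omega

def decimal_para_octal_com_explicacao_alt (decimal : Int) : String × String :=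
  let p := if decimal > 0 then pvRecB decimal else ("", "")
  (p.1, p.2 ++ " = " ++ p.1)

-- ===== PRECONDITION & SPEC =====
def Spec_decimal_para_octal_com_explicacao (decimal : Int) (out : String × String) : Prop := out = decimal_para_octal_com_explicacao_alt decimal
instance (decimal : Int) (out : String × String) : Decidable (Spec_decimal_para_octal_com_explicacao decimal out) := by unfold Spec_decimal_para_octal_com_explicacao; infer_instance

-- ===== CLAIM (what is proved, stated in full; the proofs are below) =====
def Claim_equal_decimal_para_octal_com_explicacao : Prop := ∀ (decimal : Int), Dom_decimal_para_octal_com_explicacao decimal → Spec_decimal_para_octal_com_explicacao decimal (decimal_para_octal_com_explicacao decimal)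

-- ===== LEMMAS AND PROOFS =====
theorem pv_core_ne_nil : ∀ (f n : Nat) (l : List Char), l ≠ [] → Nat.toDigitsCore 10 f n l ≠ [] := by
  intro f
  induction f with
  | zero => intro n l h; simpa [Nat.toDigitsCore] using h
  | succ f ih =>
    intro n l h
    rw [Nat.toDigitsCore]
    split
    · simp
    · exact ih _ _ (by simp)

theorem pv_toDigits_ne_nil (m : Nat) : Nat.toDigits 10 m ≠ [] := by
  rw [Nat.toDigits, Nat.toDigitsCore]
  split
  · simp
  · exact pv_core_ne_nil _ _ _ (by simp)

theorem pv_toStr_ne_empty (n : Int) : PySem.Int.toStr n ≠ "" := by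
  intro h
  have h2 := congrArg String.toList h
  rw [PySem.Int.toList_toStr] at h2
  simp only [PySem.Int.toChars, String.toList_empty] at h2
  split at h2
  · exact absurd h2 (by simp)
  · exact pv_toDigits_ne_nil _ h2

theorem pv_append_ne_empty (s t : String) (h : t ≠ "") : s ++ t ≠ "" := by
  intro h'
  have h2 := congrArg String.toList h'
  simp at h2
  exact h h2.2

-- the explanation line both Pythons format for the current value d
def pvLine (d : Int) : String :=
  PySem.Int.toStr d ++ " ÷ 8 = " ++ PySem.Int.toStr (PySem.Int.floordiv d 8)
    ++ ", resto " ++ PySem.Int.toStr (PySem.Int.mod d 8)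

theorem pv_line_ne_empty (d : Int) : pvLine d ≠ "" :=
  pv_append_ne_empty _ _ (pv_toStr_ne_empty _)

theorem pvLoopA_pos (d : Int) (hd : d > 0) (no ex : String) :
    pvLoopA d no ex
      = pvLoopA (PySem.Int.floordiv d 8)
          (PySem.Int.toStr (PySem.Int.mod d 8) ++ no)
          (if ex ≠ "" then pvLine d ++ " + " ++ ex else pvLine d) := by
  rw [pvLoopA, dif_pos hd]; rfl

theorem pvLoopA_nonpos (d : Int) (hd : ¬ d > 0) (no ex : String) :
    pvLoopA d no ex = (no, ex) := by
  rw [pvLoopA, dif_neg hd]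

theorem pvRecB_big (d : Int) (h : PySem.Int.floordiv d 8 > 0) :
    pvRecB d = ((pvRecB (PySem.Int.floordiv d 8)).1 ++ PySem.Int.toStr (PySem.Int.mod d 8),
                (pvRecB (PySem.Int.floordiv d 8)).2 ++ " + " ++ pvLine d) := by
  rw [pvRecB, dif_pos h]; rfl

theorem pvRecB_small (d : Int) (h : ¬ PySem.Int.floordiv d 8 > 0) :
    pvRecB d = (PySem.Int.toStr (PySem.Int.mod d 8), pvLine d) := by
  rw [pvRecB, dif_neg h]; rfl

theorem pv_loop_eq_rec : ∀ (n : Nat) (d : Int), d.toNat ≤ n → 0 < d → ∀ (no ex : String),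
    pvLoopA d no ex
      = ((pvRecB d).1 ++ no,
         if ex = "" then (pvRecB d).2 else (pvRecB d).2 ++ " + " ++ ex) := by
  intro n
  induction n with
  | zero => intro d hle hd no ex; omega
  | succ n ih =>
    intro d hle hd no ex
    rw [pvLoopA_pos d hd no ex]
    have hlt : (PySem.Int.floordiv d 8).toNat < d.toNat := by
      rw [PySem.Int.floordiv_eq_ediv_of_pos (by norm_num)]
      have h1 := Int.mul_ediv_add_emod d 8
      have h2 := Int.emod_nonneg d (by norm_num : (8:Int) ≠ 0)
      have h3 := Int.emod_lt_of_pos d (by norm_num : (0:Int) < 8)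
      omega
    by_cases hex : ex = ""
    · subst hex
      rw [if_neg (by simp)]
      by_cases hfd : PySem.Int.floordiv d 8 > 0
      · rw [ih _ (by omega) hfd, pvRecB_big d hfd, if_neg (pv_line_ne_empty d), if_pos rfl]
        simp [String.append_assoc]
      · rw [pvLoopA_nonpos _ hfd, pvRecB_small d hfd, if_pos rfl]
    · rw [if_pos hex]
      by_cases hfd : PySem.Int.floordiv d 8 > 0
      · rw [ih _ (by omega) hfd, pvRecB_big d hfd,
          if_neg (pv_append_ne_empty _ _ hex), if_neg hex]
        simp [String.append_assoc]
      · rw [pvLoopA_nonpos _ hfd, pvRecB_small d hfd, if_neg hex]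

-- ===== VERDICT (by name: the statement is the Claim_ definition above) =====
theorem decimal_para_octal_com_explicacao_spec : Claim_equal_decimal_para_octal_com_explicacao := by
  intro decimal _
  unfold Spec_decimal_para_octal_com_explicacao
  unfold decimal_para_octal_com_explicacao decimal_para_octal_com_explicacao_alt
  by_cases hd : decimal > 0
  · rw [pv_loop_eq_rec decimal.toNat decimal le_rfl hd "" ""]
    simp [hd]
  · rw [pvLoopA_nonpos _ hd]
    simp [hd]
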